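-- pv_equiv track=rewrite | github.com/NegativeNancy/Advent-of-Code | 2021/day-3.py | get_fequent_bit
-- ===== SOURCE A (Python) =====
-- def get_fequent_bit(data, binary_c, len_d):
--     mostFrequent, leastFrequent, data_c, numList = '', '', 0, []
--
--     while data_c < len_d:
--         binary = data[data_c]
--         numList.append(binary[binary_c])
--         data_c += 1
--     mostFrequent += (max(sorted(set(numList), reverse=True), key=numList.count))
--     leastFrequent += (min(sorted(set(numList)), key=numList.count))
--
--     return mostFrequent, leastFrequent
-- ===== SOURCE B (Python) =====
-- def get_fequent_bit(data, binary_c, len_d):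
--     # Sort the column once, then recursively scan runs of equal characters:
--     # the longest run is the most frequent value, the shortest the least.
--     col = sorted(data[i][binary_c] for i in range(len_d))
--     most, _hi, least, _lo = _scan(col)
--     return most, least
--
--
-- def _scan(col):
--     # col is sorted and non-empty; returns (most, hi, least, lo).
--     c = col[0]
--     n = 1
--     while n < len(col) and col[n] == c:
--         n += 1
--     rest = col[n:]
--     if not rest:
--         return c, n, c, n
--     most, hi, least, lo = _scan(rest)
--     # every char in rest is strictly greater than c, so on a tie of run
--     # lengths the larger char (from rest) wins 'most' and c wins 'least'
--     if n > hi: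
--         most, hi = c, n
--     if n <= lo:
--         least, lo = c, n
--     return most, hi, least, lo
-- ===== Notes on version B (the rewrite author's own statement) =====
-- stated objective: alternative
-- what changed: B sorts the column once and then recursively scans runs of equal characters, taking the longest run as most frequent and the shortest as least (run order on the sorted list reproduces A's lexicographic tie-breaks), instead of A's set + per-candidate numList.count scans.
import Mathlib
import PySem

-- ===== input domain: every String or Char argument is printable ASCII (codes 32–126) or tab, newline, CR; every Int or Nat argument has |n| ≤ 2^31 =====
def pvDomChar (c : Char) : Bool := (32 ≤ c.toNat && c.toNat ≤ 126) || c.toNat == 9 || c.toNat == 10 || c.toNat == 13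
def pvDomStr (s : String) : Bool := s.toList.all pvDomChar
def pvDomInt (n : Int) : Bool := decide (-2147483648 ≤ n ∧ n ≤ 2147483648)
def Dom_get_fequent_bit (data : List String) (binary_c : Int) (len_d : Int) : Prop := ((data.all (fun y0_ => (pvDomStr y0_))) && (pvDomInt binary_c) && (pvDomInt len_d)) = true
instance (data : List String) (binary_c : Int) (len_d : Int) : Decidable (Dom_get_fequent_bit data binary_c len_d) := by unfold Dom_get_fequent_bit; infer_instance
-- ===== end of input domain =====

-- B sorts the column once and recursively scans runs of equal characters (longest run =
-- most frequent, shortest = least; run order on the sorted list gives A's tie-breaks),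
-- instead of A's sorted(set) + per-candidate .count scans; objective: alternative.


-- ===== PORT A =====
-- while data_c < len_d: numList.append(data[data_c][binary_c]);
-- most = max(sorted(set(numList), reverse=True), key=numList.count);
-- least = min(sorted(set(numList)), key=numList.count)   (indexing total via pyGetD under Pre_)
def get_fequent_bit (data : List String) (binary_c : Int) (len_d : Int) : String × String :=
  let numList : List Char :=
    (PySem.List.pyRange 0 len_d 1).foldl
      (fun acc i => acc ++ [PySem.List.pyGetD (PySem.List.pyGetD data i "").toList binary_c ' ']) []
  let mostFrequent : String :=
    String.ofList [(PySem.List.max? (PySem.List.sorted (PySem.Set.ofList numList) (fun x => x) true)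
      (fun c => numList.count c)).getD ' ']
  let leastFrequent : String :=
    String.ofList [(PySem.List.min? (PySem.List.sorted (PySem.Set.ofList numList) (fun x => x) false)
      (fun c => numList.count c)).getD ' ']
  (mostFrequent, leastFrequent)

-- ===== PORT B =====
-- _scan(col): take the run of col[0] via the while loop (takeWhile/dropWhile), recurse on the
-- rest, then update most on n > hi and least on n <= lo; [] is unreachable under Pre_
-- (Python's _scan would raise IndexError on an empty col) and returns a placeholder.
def pvScan : List Char → Char × Int × Char × Int
  | [] => (' ', 0, ' ', 0)
  | c :: t =>
      let n : Int := 1 + (t.takeWhile (fun x => x == c)).length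
      let rest := t.dropWhile (fun x => x == c)
      if rest.isEmpty then (c, n, c, n)
      else
        let r := pvScan rest
        let mh := if n > r.2.1 then (c, n) else (r.1, r.2.1)
        let ll := if n ≤ r.2.2.2 then (c, n) else (r.2.2.1, r.2.2.2)
        (mh.1, mh.2, ll.1, ll.2)
  termination_by col => col.length
  decreasing_by
    have := List.length_dropWhile_le (fun x => x == c) t
    simp; omega

-- col = sorted(data[i][binary_c] for i in range(len_d)); most,_,least,_ = _scan(col)
def get_fequent_bit_alt (data : List String) (binary_c : Int) (len_d : Int) : String × String :=
  let col : List Char :=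
    PySem.List.sorted
      ((PySem.List.pyRange 0 len_d 1).map
        (fun i => PySem.List.pyGetD (PySem.List.pyGetD data i "").toList binary_c ' '))
      (fun x => x) false
  let r := pvScan col
  (String.ofList [r.1], String.ofList [r.2.2.1])

-- ===== PRECONDITION & SPEC =====
-- Pre_ excludes exactly the inputs where the Python A raises: len_d ≤ 0 (max() on an empty
-- sequence, ValueError), len_d > len(data) (IndexError on data[data_c]), and a column index
-- out of range for one of the first len_d rows (IndexError on binary[binary_c]).
def Pre_get_fequent_bit (data : List String) (binary_c : Int) (len_d : Int) : Prop :=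
  0 < len_d ∧ len_d ≤ (data.length : Int) ∧
    ∀ s ∈ data.take len_d.toNat, PySem.Raise.InRange s.toList.length binary_c
instance (data : List String) (binary_c : Int) (len_d : Int) : Decidable (Pre_get_fequent_bit data binary_c len_d) := by unfold Pre_get_fequent_bit; infer_instance
def pvWitness_get_fequent_bit : List String × Int × Int := (["10", "01", "11"], 0, 3)
def Spec_get_fequent_bit (data : List String) (binary_c : Int) (len_d : Int) (out : String × String) : Prop := out = get_fequent_bit_alt data binary_c len_d
instance (data : List String) (binary_c : Int) (len_d : Int) (out : String × String) : Decidable (Spec_get_fequent_bit data binary_c len_d out) := by unfold Spec_get_fequent_bit; infer_instance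

-- ===== CLAIM (what is proved, stated in full; the proofs are below) =====
def Claim_equal_get_fequent_bit : Prop := ∀ (data : List String) (binary_c : Int) (len_d : Int), Dom_get_fequent_bit data binary_c len_d → Pre_get_fequent_bit data binary_c len_d → Spec_get_fequent_bit data binary_c len_d (get_fequent_bit data binary_c len_d)

-- ===== LEMMAS AND PROOFS =====

-- "m is the (count, char)-lexicographically greatest / least element of S"
def pvIsLexMax (L S : List Char) (m : Char) : Prop :=
  m ∈ S ∧ ∀ y ∈ S, L.count y < L.count m ∨ (L.count y = L.count m ∧ y ≤ m)
def pvIsLexMin (L S : List Char) (m : Char) : Prop :=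
  m ∈ S ∧ ∀ y ∈ S, L.count m < L.count y ∨ (L.count m = L.count y ∧ m ≤ y)

theorem pvLexMax_unique {L S : List Char} {m m' : Char}
    (h : pvIsLexMax L S m) (h' : pvIsLexMax L S m') : m = m' := by
  rcases h with ⟨hm, hmax⟩; rcases h' with ⟨hm', hmax'⟩
  rcases hmax m' hm' with h1 | ⟨h1, h2⟩ <;> rcases hmax' m hm with h3 | ⟨h3, h4⟩
  · omega
  · omega
  · omega
  · exact le_antisymm h4 h2

theorem pvLexMin_unique {L S : List Char} {m m' : Char}
    (h : pvIsLexMin L S m) (h' : pvIsLexMin L S m') : m = m' := by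
  rcases h with ⟨hm, hmin⟩; rcases h' with ⟨hm', hmin'⟩
  rcases hmin m' hm' with h1 | ⟨h1, h2⟩ <;> rcases hmin' m hm with h3 | ⟨h3, h4⟩
  · omega
  · omega
  · omega
  · exact le_antisymm h2 h4

theorem pvLexTrans {k1 k2 : Type} [LinearOrder k1] [LinearOrder k2]
    {a1 b1 c1 : k1} {a2 b2 c2 : k2}
    (h1 : a1 < b1 ∨ (a1 = b1 ∧ a2 ≤ b2)) (h2 : b1 < c1 ∨ (b1 = c1 ∧ b2 ≤ c2)) :
    a1 < c1 ∨ (a1 = c1 ∧ a2 ≤ c2) := by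
  rcases h1 with h1 | ⟨h1, h1'⟩ <;> rcases h2 with h2 | ⟨h2, h2'⟩
  · exact Or.inl (lt_trans h1 h2)
  · exact Or.inl (h2 ▸ h1)
  · exact Or.inl (h1 ▸ h2)
  · exact Or.inr ⟨h1.trans h2, h1'.trans h2'⟩

-- max? over a strictly DECREASING char list keeps, among count ties, the largest char
theorem pvMaxDesc (key : Char → Nat) :
    ∀ (T : List Char) (m0 : Char), (∀ x ∈ T, x < m0) → T.Pairwise (fun a b => b < a) →
    ∃ m, PySem.List.max? (m0 :: T) key = some m ∧ m ∈ m0 :: T ∧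
      ∀ y ∈ m0 :: T, key y < key m ∨ (key y = key m ∧ y ≤ m) := by
  intro T
  induction T with
  | nil =>
    intro m0 _ _
    exact ⟨m0, rfl, by simp, by simp⟩
  | cons x t ih =>
    intro m0 hlt hpw
    have hxt : ∀ z ∈ t, z < x := fun z hz => List.rel_of_pairwise_cons hpw hz
    by_cases hc : key m0 < key x
    · obtain ⟨m, heq, hmem, hprop⟩ := ih x hxt hpw.of_cons
      refine ⟨m, ?_, List.mem_cons_of_mem m0 hmem, ?_⟩
      · simp only [PySem.List.max?, List.foldl_cons] at heq ⊢
        rw [if_pos hc]; exact heq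
      · intro y hy
        rcases List.mem_cons.mp hy with rfl | hy
        · exact pvLexTrans (Or.inl hc) (hprop x List.mem_cons_self)
        · exact hprop y hy
    · obtain ⟨m, heq, hmem, hprop⟩ := ih m0 (fun z hz => hlt z (List.mem_cons_of_mem x hz)) hpw.of_cons
      refine ⟨m, ?_, ?_, ?_⟩
      · simp only [PySem.List.max?, List.foldl_cons] at heq ⊢
        rw [if_neg hc]; exact heq
      · rcases List.mem_cons.mp hmem with rfl | h
        · exact List.mem_cons_self
        · exact List.mem_cons_of_mem m0 (List.mem_cons_of_mem x h)
      · intro y hy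
        rcases List.mem_cons.mp hy with rfl | hy
        · exact hprop y List.mem_cons_self
        rcases List.mem_cons.mp hy with rfl | hy
        · have hx0 : key y < key m0 ∨ (key y = key m0 ∧ y ≤ m0) := by
            rcases Nat.lt_or_ge (key y) (key m0) with h | h
            · exact Or.inl h
            · exact Or.inr ⟨by omega, le_of_lt (hlt y List.mem_cons_self)⟩
          exact pvLexTrans hx0 (hprop m0 List.mem_cons_self)
        · exact hprop y (List.mem_cons_of_mem m0 hy)

-- min? over a strictly INCREASING char list keeps, among count ties, the smallest char
theorem pvMinAsc (key : Char → Nat) :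
    ∀ (T : List Char) (m0 : Char), (∀ x ∈ T, m0 < x) → T.Pairwise (fun a b => a < b) →
    ∃ m, PySem.List.min? (m0 :: T) key = some m ∧ m ∈ m0 :: T ∧
      ∀ y ∈ m0 :: T, key m < key y ∨ (key m = key y ∧ m ≤ y) := by
  intro T
  induction T with
  | nil =>
    intro m0 _ _
    exact ⟨m0, rfl, by simp, by simp⟩
  | cons x t ih =>
    intro m0 hlt hpw
    have hxt : ∀ z ∈ t, x < z := fun z hz => List.rel_of_pairwise_cons hpw hz
    by_cases hc : key x < key m0
    · obtain ⟨m, heq, hmem, hprop⟩ := ih x hxt hpw.of_cons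
      refine ⟨m, ?_, List.mem_cons_of_mem m0 hmem, ?_⟩
      · simp only [PySem.List.min?, List.foldl_cons] at heq ⊢
        rw [if_pos hc]; exact heq
      · intro y hy
        rcases List.mem_cons.mp hy with rfl | hy
        · exact pvLexTrans (hprop x List.mem_cons_self) (Or.inl hc)
        · exact hprop y hy
    · obtain ⟨m, heq, hmem, hprop⟩ := ih m0 (fun z hz => hlt z (List.mem_cons_of_mem x hz)) hpw.of_cons
      refine ⟨m, ?_, ?_, ?_⟩
      · simp only [PySem.List.min?, List.foldl_cons] at heq ⊢
        rw [if_neg hc]; exact heq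
      · rcases List.mem_cons.mp hmem with rfl | h
        · exact List.mem_cons_self
        · exact List.mem_cons_of_mem m0 (List.mem_cons_of_mem x h)
      · intro y hy
        rcases List.mem_cons.mp hy with rfl | hy
        · exact hprop y List.mem_cons_self
        rcases List.mem_cons.mp hy with rfl | hy
        · have hx0 : key m0 < key y ∨ (key m0 = key y ∧ m0 ≤ y) := by
            rcases Nat.lt_or_ge (key m0) (key y) with h | h
            · exact Or.inl h
            · exact Or.inr ⟨by omega, le_of_lt (hlt y List.mem_cons_self)⟩
          exact pvLexTrans (hprop m0 List.mem_cons_self) hx0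
        · exact hprop y (List.mem_cons_of_mem m0 hy)

-- A's selections compute the lexicographic extrema of (count, char) over set(numList)
theorem pvAmost (L : List Char) (hLne : L ≠ []) :
    ∃ m, PySem.List.max? (PySem.List.sorted (PySem.Set.ofList L) (fun x => x) true)
      (fun c => L.count c) = some m ∧ pvIsLexMax L (PySem.Set.ofList L) m := by
  have hSne : PySem.Set.ofList L ≠ [] := by
    obtain ⟨c, hc⟩ := List.exists_mem_of_ne_nil L hLne
    exact List.ne_nil_of_mem ((PySem.Set.mem_ofList L c).mpr hc)
  have hnd : (PySem.List.sorted (PySem.Set.ofList L) (fun x => x) true).Nodup :=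
    ((PySem.List.sorted_perm (PySem.Set.ofList L) (fun x => x) true).nodup_iff).mpr
      (PySem.Set.nodup_ofList L)
  have hle := PySem.List.sorted_pairwise_rev (PySem.Set.ofList L) (fun x => x)
  have hdesc : (PySem.List.sorted (PySem.Set.ofList L) (fun x => x) true).Pairwise
      (fun a b => b < a) :=
    (List.pairwise_and_iff.mpr ⟨hle, hnd⟩).imp (fun h => lt_of_le_of_ne h.1 (Ne.symm h.2))
  cases hT : PySem.List.sorted (PySem.Set.ofList L) (fun x => x) true with
  | nil => exact absurd ((PySem.List.sorted_eq_nil_iff _ _ _).mp hT) hSne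
  | cons t rest =>
    rw [hT] at hdesc
    obtain ⟨m, heq, hmem, hprop⟩ := pvMaxDesc (fun c => L.count c) rest t
      (fun z hz => List.rel_of_pairwise_cons hdesc hz) hdesc.of_cons
    refine ⟨m, ?_, ?_, ?_⟩
    · exact heq
    · have hm : m ∈ t :: rest := hmem
      rw [← hT] at hm
      exact (PySem.List.mem_sorted _ _ _ _).mp hm
    · intro y hy
      have hy' : y ∈ t :: rest := by
        rw [← hT]; exact (PySem.List.mem_sorted _ _ _ _).mpr hy
      exact hprop y hy'

theorem pvAleast (L : List Char) (hLne : L ≠ []) :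
    ∃ m, PySem.List.min? (PySem.List.sorted (PySem.Set.ofList L) (fun x => x) false)
      (fun c => L.count c) = some m ∧ pvIsLexMin L (PySem.Set.ofList L) m := by
  have hSne : PySem.Set.ofList L ≠ [] := by
    obtain ⟨c, hc⟩ := List.exists_mem_of_ne_nil L hLne
    exact List.ne_nil_of_mem ((PySem.Set.mem_ofList L c).mpr hc)
  have hasc := PySem.List.sorted_ofList_pairwise_lt L
  cases hT : PySem.List.sorted (PySem.Set.ofList L) (fun x => x) false with
  | nil => exact absurd ((PySem.List.sorted_eq_nil_iff _ _ _).mp hT) hSne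
  | cons t rest =>
    rw [hT] at hasc
    obtain ⟨m, heq, hmem, hprop⟩ := pvMinAsc (fun c => L.count c) rest t
      (fun z hz => List.rel_of_pairwise_cons hasc hz) hasc.of_cons
    refine ⟨m, ?_, ?_, ?_⟩
    · exact heq
    · have hm : m ∈ t :: rest := hmem
      rw [← hT] at hm
      exact (PySem.List.mem_sorted _ _ _ _).mp hm
    · intro y hy
      have hy' : y ∈ t :: rest := by
        rw [← hT]; exact (PySem.List.mem_sorted _ _ _ _).mpr hy
      exact hprop y hy'

-- after dropping the leading run of c from a sorted tail, everything left is > c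
theorem pvDropWhile_gt (c : Char) :
    ∀ (t : List Char), (∀ x ∈ t, c ≤ x) → t.Pairwise (· ≤ ·) →
    ∀ x ∈ t.dropWhile (fun x => x == c), c < x := by
  intro t
  induction t with
  | nil => intro _ _ x hx; simp [List.dropWhile] at hx
  | cons a t' ih =>
    intro hle hpw x hx
    by_cases ha : (a == c) = true
    · rw [List.dropWhile_cons, if_pos ha] at hx
      exact ih (fun z hz => hle z (List.mem_cons_of_mem a hz)) hpw.of_cons x hx
    · rw [List.dropWhile_cons, if_neg ha] at hx
      have hca : c < a :=
        lt_of_le_of_ne (hle a List.mem_cons_self) (fun h => ha (by simp [h.symm]))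
      rcases List.mem_cons.mp hx with rfl | hx
      · exact hca
      · exact lt_of_lt_of_le hca (List.rel_of_pairwise_cons hpw hx)

-- B's run scan over a sorted non-empty list returns the (count, char)-lexicographic
-- extrema of the list together with their counts
theorem pvScan_spec :
    ∀ (col : List Char), col ≠ [] → col.Pairwise (· ≤ ·) →
    ∃ m hi l lo, pvScan col = (m, hi, l, lo) ∧
      m ∈ col ∧ hi = (col.count m : Int) ∧
      (∀ y ∈ col, col.count y < col.count m ∨ (col.count y = col.count m ∧ y ≤ m)) ∧
      l ∈ col ∧ lo = (col.count l : Int) ∧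
      (∀ y ∈ col, col.count l < col.count y ∨ (col.count l = col.count y ∧ l ≤ y)) := by
  suffices H : ∀ (N : Nat) (col : List Char), col.length ≤ N → col ≠ [] → col.Pairwise (· ≤ ·) →
      ∃ m hi l lo, pvScan col = (m, hi, l, lo) ∧
        m ∈ col ∧ hi = (col.count m : Int) ∧
        (∀ y ∈ col, col.count y < col.count m ∨ (col.count y = col.count m ∧ y ≤ m)) ∧
        l ∈ col ∧ lo = (col.count l : Int) ∧
        (∀ y ∈ col, col.count l < col.count y ∨ (col.count l = col.count y ∧ l ≤ y)) by
    intro col; exact H col.length col (le_refl _)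
  intro N
  induction N with
  | zero =>
    intro col hN hne _
    exact absurd (List.length_eq_zero_iff.mp (Nat.le_zero.mp hN)) hne
  | succ N ihN =>
  intro col hN hne hpw
  match col, hne with
  | c :: t, _ =>
    have hpt : t.Pairwise (· ≤ ·) := hpw.of_cons
    have hct : ∀ x ∈ t, c ≤ x := fun x hx => List.rel_of_pairwise_cons hpw hx
    set g := t.takeWhile (fun x => x == c) with hg
    set rest := t.dropWhile (fun x => x == c) with hrest
    have hsplit : t = g ++ rest := (List.takeWhile_append_dropWhile).symm
    have hgc : ∀ x ∈ g, x = c := fun x hx => by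
      have := List.mem_takeWhile_imp hx; simpa using this
    have hrgt : ∀ x ∈ rest, c < x := pvDropWhile_gt c t hct hpt
    have hrpw : rest.Pairwise (· ≤ ·) := hpt.sublist (List.dropWhile_sublist _)
    have hcntc : (c :: t).count c = 1 + g.length := by
      rw [hsplit, List.count_cons_self, List.count_append]
      have h1 : g.count c = g.length := List.count_eq_length.mpr (fun b hb => ((hgc b hb).symm ▸ rfl))
      have h2 : rest.count c = 0 := List.count_eq_zero.mpr (fun h => lt_irrefl c (hrgt c h))
      omega
    have hcnty : ∀ y, c < y → (c :: t).count y = rest.count y := by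
      intro y hy
      rw [hsplit, List.count_cons, List.count_append]
      have h1 : g.count y = 0 := List.count_eq_zero.mpr
        (fun h => absurd (hgc y h) (by intro he; exact absurd (he ▸ hy) (lt_irrefl c)))
      have h2 : ¬ (c == y) = true := by simp; intro he; exact absurd (he ▸ hy) (lt_irrefl c)
      simp [h2, h1]
    have hmemgc : ∀ y ∈ c :: t, y = c ∨ y ∈ rest := by
      intro y hy
      rcases List.mem_cons.mp hy with rfl | hy
      · exact Or.inl rfl
      · rw [hsplit] at hy
        rcases List.mem_append.mp hy with h | h
        · exact Or.inl (hgc y h)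
        · exact Or.inr h
    by_cases hre : rest.isEmpty
    · -- single run: everything equals c
      refine ⟨c, 1 + g.length, c, 1 + g.length, ?_, List.mem_cons_self, ?_, ?_, List.mem_cons_self, ?_, ?_⟩
      · rw [pvScan]; simp only [← hg, ← hrest, hre, if_pos]
      · rw [hcntc]; push_cast; ring
      · intro y hy
        rcases hmemgc y hy with rfl | h
        · exact Or.inr ⟨rfl, le_refl _⟩
        · exact absurd h (by simp [List.isEmpty_iff] at hre; simp [hre])
      · rw [hcntc]; push_cast; ring
      · intro y hy
        rcases hmemgc y hy with rfl | h
        · exact Or.inr ⟨rfl, le_refl _⟩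
        · exact absurd h (by simp [List.isEmpty_iff] at hre; simp [hre])
    · have hrne : rest ≠ [] := by simpa [List.isEmpty_iff] using hre
      have hdw : rest.length ≤ t.length := by
        rw [hrest]; exact List.length_dropWhile_le (fun x => x == c) t
      have hlenN : rest.length ≤ N := by
        simp only [List.length_cons] at hN
        omega
      obtain ⟨m, hi, l, lo, hreq, hmm, hhi, hmx, hlm, hlo, hmn⟩ := ihN rest hlenN hrne hrpw
      have hcm : c < m := hrgt m hmm
      have hcl : c < l := hrgt l hlm
      have hcm' : (c :: t).count m = rest.count m := hcnty m hcm
      have hcl' : (c :: t).count l = rest.count l := hcnty l hcl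
      set n : Int := 1 + (g.length : Int) with hn
      have hscan : pvScan (c :: t) =
          ((if n > hi then (c, n) else (m, hi)).1, (if n > hi then (c, n) else (m, hi)).2,
           (if n ≤ lo then (c, n) else (l, lo)).1, (if n ≤ lo then (c, n) else (l, lo)).2) := by
        have hre' : rest.isEmpty = false := by simpa using hre
        rw [pvScan]
        simp only [← hg, ← hrest, hre', Bool.false_eq_true, if_false, hreq]
        rw [hn]
      have hcntcZ : ((c :: t).count c : Int) = n := by rw [hcntc]; push_cast; ring
      -- the two updates
      by_cases h1 : n > hi <;> by_cases h2 : n ≤ lo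
      · refine ⟨c, n, c, n, by rw [hscan]; simp [h1, h2], List.mem_cons_self, hcntcZ.symm, ?_,
          List.mem_cons_self, hcntcZ.symm, ?_⟩
        · intro y hy
          rcases hmemgc y hy with he | h
          · rw [he]; exact Or.inr ⟨rfl, le_refl _⟩
          · have hyc := hcnty y (hrgt y h)
            rcases hmx y h with h' | ⟨h', _⟩ <;> rw [hhi] at h1 <;> omega
        · intro y hy
          rcases hmemgc y hy with he | h
          · rw [he]; exact Or.inr ⟨rfl, le_refl _⟩
          · have hyc := hcnty y (hrgt y h)
            rcases hmn y h with h' | ⟨h', _⟩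
            · rw [hlo] at h2; omega
            · rw [hlo] at h2
              rcases Nat.lt_or_ge ((c::t).count c) ((c::t).count y) with hh | hh
              · exact Or.inl hh
              · exact Or.inr ⟨by omega, le_of_lt (hrgt y h)⟩
      · refine ⟨c, n, l, lo, by rw [hscan]; simp [h1, h2], List.mem_cons_self, hcntcZ.symm, ?_,
          List.mem_cons_of_mem c (hsplit ▸ List.mem_append_right g hlm), by rw [hcl']; exact hlo, ?_⟩
        · intro y hy
          rcases hmemgc y hy with he | h
          · rw [he]; exact Or.inr ⟨rfl, le_refl _⟩
          · have hyc := hcnty y (hrgt y h)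
            rcases hmx y h with h' | ⟨h', _⟩ <;> rw [hhi] at h1 <;> omega
        · intro y hy
          rcases hmemgc y hy with he | h
          · rw [he, hcl']
            rw [hlo] at h2
            exact Or.inl (by omega)
          · rw [hcl', hcnty y (hrgt y h)]; exact hmn y h
      · refine ⟨m, hi, c, n, by rw [hscan]; simp [h1, h2],
          List.mem_cons_of_mem c (hsplit ▸ List.mem_append_right g hmm), by rw [hcm']; exact hhi, ?_,
          List.mem_cons_self, hcntcZ.symm, ?_⟩
        · intro y hy
          rcases hmemgc y hy with he | h
          · rw [he, hcm']
            rw [hhi] at h1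
            rcases Nat.lt_or_ge ((c::t).count c) (rest.count m) with hh | hh
            · exact Or.inl hh
            · exact Or.inr ⟨by omega, le_of_lt hcm⟩
          · rw [hcm', hcnty y (hrgt y h)]; exact hmx y h
        · intro y hy
          rcases hmemgc y hy with he | h
          · rw [he]; exact Or.inr ⟨rfl, le_refl _⟩
          · have hyc := hcnty y (hrgt y h)
            rcases hmn y h with h' | ⟨h', _⟩
            · rw [hlo] at h2; omega
            · rw [hlo] at h2
              rcases Nat.lt_or_ge ((c::t).count c) ((c::t).count y) with hh | hh
              · exact Or.inl hh
              · exact Or.inr ⟨by omega, le_of_lt (hrgt y h)⟩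
      · refine ⟨m, hi, l, lo, by rw [hscan]; simp [h1, h2],
          List.mem_cons_of_mem c (hsplit ▸ List.mem_append_right g hmm), by rw [hcm']; exact hhi, ?_,
          List.mem_cons_of_mem c (hsplit ▸ List.mem_append_right g hlm), by rw [hcl']; exact hlo, ?_⟩
        · intro y hy
          rcases hmemgc y hy with he | h
          · rw [he, hcm']
            rw [hhi] at h1
            rcases Nat.lt_or_ge ((c::t).count c) (rest.count m) with hh | hh
            · exact Or.inl hh
            · exact Or.inr ⟨by omega, le_of_lt hcm⟩
          · rw [hcm', hcnty y (hrgt y h)]; exact hmx y h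
        · intro y hy
          rcases hmemgc y hy with he | h
          · rw [he, hcl']
            rw [hlo] at h2
            exact Or.inl (by omega)
          · rw [hcl', hcnty y (hrgt y h)]; exact hmn y h

-- ===== VERDICT (by name: the statement is the Claim_ definition above) =====
theorem get_fequent_bit_spec : Claim_equal_get_fequent_bit := by
  intro data binary_c len_d _ hpre
  obtain ⟨hld, _, _⟩ := hpre
  unfold Spec_get_fequent_bit get_fequent_bit get_fequent_bit_alt
  simp only []
  have hnum : (PySem.List.pyRange 0 len_d 1).foldl
      (fun acc i => acc ++ [PySem.List.pyGetD (PySem.List.pyGetD data i "").toList binary_c ' ']) []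
      = (PySem.List.pyRange 0 len_d 1).map
        (fun i => PySem.List.pyGetD (PySem.List.pyGetD data i "").toList binary_c ' ') := by
    rw [PySem.List.foldl_append_singleton_eq_map]; rfl
  rw [hnum]
  set L : List Char := (PySem.List.pyRange 0 len_d 1).map
    (fun i => PySem.List.pyGetD (PySem.List.pyGetD data i "").toList binary_c ' ') with hLdef
  have hLne : L ≠ [] := by
    have hlen : L.length = (len_d - 0).toNat := by
      rw [hLdef, List.length_map, PySem.List.length_pyRange_one]
    intro hnil
    rw [hnil] at hlen
    simp at hlen
    omega
  set col : List Char := PySem.List.sorted L (fun x => x) false with hcol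
  have hperm : col.Perm L := PySem.List.sorted_perm L (fun x => x) false
  have hcne : col ≠ [] := fun h => hLne ((PySem.List.sorted_eq_nil_iff _ _ _).mp h)
  have hcpw : col.Pairwise (· ≤ ·) := PySem.List.sorted_pairwise L (fun x => x)
  obtain ⟨m, hi, l, lo, hscan, hmm, _, hmx, hlm, _, hmn⟩ := pvScan_spec col hcne hcpw
  -- B's extrema satisfy A's lexicographic characterisations over set(L)
  have hBmax : pvIsLexMax L (PySem.Set.ofList L) m := by
    refine ⟨(PySem.Set.mem_ofList L m).mpr (hperm.mem_iff.mp hmm), ?_⟩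
    intro y hy
    have hyL : y ∈ L := (PySem.Set.mem_ofList L y).mp hy
    have := hmx y (hperm.mem_iff.mpr hyL)
    rwa [hperm.count_eq, hperm.count_eq] at this
  have hBmin : pvIsLexMin L (PySem.Set.ofList L) l := by
    refine ⟨(PySem.Set.mem_ofList L l).mpr (hperm.mem_iff.mp hlm), ?_⟩
    intro y hy
    have hyL : y ∈ L := (PySem.Set.mem_ofList L y).mp hy
    have := hmn y (hperm.mem_iff.mpr hyL)
    rwa [hperm.count_eq, hperm.count_eq] at this
  obtain ⟨mA, hA, hAx⟩ := pvAmost L hLne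
  obtain ⟨lA, hA', hAx'⟩ := pvAleast L hLne
  rw [hA, hA', hscan]
  simp only [Option.getD_some]
  rw [pvLexMax_unique hAx hBmax, pvLexMin_unique hAx' hBmin]
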